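-- pv_equiv track=rewrite | github.com/Neha081091/release-automation-poc | slack_socket_mode.py | get_ordered_pls
-- ===== SOURCE A (Python) =====
-- PRODUCT_LINE_ORDER = [
--     "Media PL1", "Media PL2", "Media",
--     "Audiences PL1", "Audiences PL2", "Audiences",
--     "DSP Core PL1", "DSP Core PL2", "DSP Core PL3", "DSP Core PL5",
--     "DSP PL1", "DSP PL2", "DSP PL3", "DSP",
--     "Developer Experience", "Developer Experience 2026",
--     "Data Ingress", "Data Ingress 2026",
--     "Helix PL3", "Helix",
--     "Data Governance", "Other",
-- ]
--
-- def get_ordered_pls(pl_list: list) -> list: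
--     ordered = []
--     for pl in PRODUCT_LINE_ORDER:
--         if pl in pl_list:
--             ordered.append(pl)
--     for pl in pl_list:
--         if pl not in ordered:
--             ordered.append(pl)
--     return ordered
-- ===== SOURCE B (Python) =====
-- PRODUCT_LINE_ORDER = [
--     "Media PL1", "Media PL2", "Media",
--     "Audiences PL1", "Audiences PL2", "Audiences",
--     "DSP Core PL1", "DSP Core PL2", "DSP Core PL3", "DSP Core PL5",
--     "DSP PL1", "DSP PL2", "DSP PL3", "DSP",
--     "Developer Experience", "Developer Experience 2026",
--     "Data Ingress", "Data Ingress 2026",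
--     "Helix PL3", "Helix",
--     "Data Governance", "Other",
-- ]
--
-- _ORDER_INDEX = {pl: i for i, pl in enumerate(PRODUCT_LINE_ORDER)}
--
-- def get_ordered_pls(pl_list: list) -> list:
--     n = len(PRODUCT_LINE_ORDER)
--     return sorted(dict.fromkeys(pl_list), key=lambda pl: _ORDER_INDEX.get(pl, n))
-- ===== Notes on version B (the rewrite author's own statement) =====
-- stated objective: faster
-- what changed: A's two passes (scan the priority list testing membership in pl_list, then scan pl_list testing membership in the growing output list) are replaced by a precomputed priority-index dict, dict.fromkeys deduplication, and one stable sort keyed by index with len(PRODUCT_LINE_ORDER) as fallback for unknown items.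
import Mathlib
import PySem

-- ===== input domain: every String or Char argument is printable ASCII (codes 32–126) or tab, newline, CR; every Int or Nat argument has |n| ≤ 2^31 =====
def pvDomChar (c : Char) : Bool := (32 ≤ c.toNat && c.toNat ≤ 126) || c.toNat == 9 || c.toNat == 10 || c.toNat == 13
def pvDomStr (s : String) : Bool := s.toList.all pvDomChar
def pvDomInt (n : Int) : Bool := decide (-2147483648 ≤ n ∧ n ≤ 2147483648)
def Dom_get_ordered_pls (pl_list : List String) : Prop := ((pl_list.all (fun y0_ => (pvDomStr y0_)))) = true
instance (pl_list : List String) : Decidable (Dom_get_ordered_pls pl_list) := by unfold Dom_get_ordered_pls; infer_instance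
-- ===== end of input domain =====

-- B replaces A's two membership-scanning passes by dedup + one stable sort keyed by a
-- precomputed priority-index dict (objective: faster; measurably so on large inputs).

-- module constant PRODUCT_LINE_ORDER (shared context of both implementations)
def PRODUCT_LINE_ORDER : List String :=
  ["Media PL1", "Media PL2", "Media",
   "Audiences PL1", "Audiences PL2", "Audiences",
   "DSP Core PL1", "DSP Core PL2", "DSP Core PL3", "DSP Core PL5",
   "DSP PL1", "DSP PL2", "DSP PL3", "DSP",
   "Developer Experience", "Developer Experience 2026",
   "Data Ingress", "Data Ingress 2026",
   "Helix PL3", "Helix",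
   "Data Governance", "Other"]

-- ===== PORT A =====
def get_ordered_pls (pl_list : List String) : List String :=
  -- ordered = []; for pl in PRODUCT_LINE_ORDER: if pl in pl_list: ordered.append(pl)
  let ordered := PRODUCT_LINE_ORDER.foldl
    (fun acc pl => if pl ∈ pl_list then acc ++ [pl] else acc) []
  -- for pl in pl_list: if pl not in ordered: ordered.append(pl)
  pl_list.foldl (fun acc pl => if pl ∉ acc then acc ++ [pl] else acc) ordered

-- ===== PORT B =====
-- _ORDER_INDEX = {pl: i for i, pl in enumerate(PRODUCT_LINE_ORDER)}
def pvOrderIndex : PySem.Dict String Int :=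
  (PySem.List.enumerate PRODUCT_LINE_ORDER).foldl
    (fun d p => d.insert p.2 p.1) PySem.Dict.empty

-- lambda pl: _ORDER_INDEX.get(pl, n)  with n = len(PRODUCT_LINE_ORDER)
def pvKey (pl : String) : Int := pvOrderIndex.getD pl (PRODUCT_LINE_ORDER.length : Int)

def get_ordered_pls_alt (pl_list : List String) : List String :=
  PySem.List.sorted (PySem.List.dedup pl_list) pvKey

-- ===== PRECONDITION & SPEC =====
def Spec_get_ordered_pls (pl_list : List String) (out : List String) : Prop := out = get_ordered_pls_alt pl_list
instance (pl_list : List String) (out : List String) : Decidable (Spec_get_ordered_pls pl_list out) := by unfold Spec_get_ordered_pls; infer_instance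

-- ===== CLAIM (what is proved, stated in full; the proofs are below) =====
def Claim_equal_get_ordered_pls : Prop := ∀ (pl_list : List String), Dom_get_ordered_pls pl_list → Spec_get_ordered_pls pl_list (get_ordered_pls pl_list)

-- ===== LEMMAS AND PROOFS =====

lemma key_lt_of_mem {x : String} (hx : x ∈ PRODUCT_LINE_ORDER) :
    pvKey x < (PRODUCT_LINE_ORDER.length : Int) := by
  fin_cases hx <;> decide

lemma key_of_not_mem {x : String} (hx : x ∉ PRODUCT_LINE_ORDER) :
    pvKey x = (PRODUCT_LINE_ORDER.length : Int) := by
  simp only [PRODUCT_LINE_ORDER, List.mem_cons, List.not_mem_nil, or_false, not_or] at hx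
  obtain ⟨h1,h2,h3,h4,h5,h6,h7,h8,h9,h10,h11,h12,h13,h14,h15,h16,h17,h18,h19,h20,h21,h22⟩ := hx
  simp [pvKey, pvOrderIndex, PRODUCT_LINE_ORDER, PySem.List.enumerate,
    PySem.Dict.getD_insert, h1, h2, h3, h4, h5, h6, h7, h8, h9, h10, h11, h12,
    h13, h14, h15, h16, h17, h18, h19, h20, h21, h22]

lemma key_le (x : String) : pvKey x ≤ (PRODUCT_LINE_ORDER.length : Int) := by
  by_cases hx : x ∈ PRODUCT_LINE_ORDER
  · exact le_of_lt (key_lt_of_mem hx)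
  · exact le_of_eq (key_of_not_mem hx)

lemma key_chain :
    PRODUCT_LINE_ORDER.Pairwise (fun a b => pvKey a < pvKey b) := by decide

-- insertBy of an element whose key is strictly below every key in the list prepends
lemma insertBy_of_forall_before {α : Type} (before : α → α → Bool) (x : α) (ys : List α)
    (h : ∀ y ∈ ys, before x y = true) :
    PySem.List.insertBy before x ys = x :: ys := by
  cases ys with
  | nil => rfl
  | cons y t => simp [PySem.List.insertBy, h y (by simp)]

-- where an element in the priority list lands when inserted into (known part ++ unknown part)
lemma insert_lem (ks : List String) : ∀ (x : String) (B d : List String),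
    ks.Pairwise (fun a b => pvKey a < pvKey b) →
    x ∈ ks → x ∉ d →
    (∀ b ∈ B, pvKey x < pvKey b) →
    PySem.List.insertBy (fun a b => decide (pvKey a < pvKey b)) x
        (ks.filter (fun k => decide (k ∈ d)) ++ B)
      = ks.filter (fun k => decide (k ∈ d ∨ k = x)) ++ B := by
  induction ks with
  | nil => intro x B d _ hx; simp at hx
  | cons k ks ih =>
    intro x B d hchain hx hxd hB
    obtain ⟨hk, hchain'⟩ := List.pairwise_cons.mp hchain
    by_cases hxk : x = k
    · subst hxk
      have hkfilt : ks.filter (fun k' => decide (k' ∈ d ∨ k' = x)) =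
          ks.filter (fun k' => decide (k' ∈ d)) := by
        apply List.filter_congr
        intro k' hk'
        have hne : k' ≠ x := fun he => absurd (he ▸ hk k' hk') (lt_irrefl _)
        simp [hne]
      rw [List.filter_cons, List.filter_cons, if_neg (by simp [hxd]),
        if_pos (by simp), hkfilt]
      rw [insertBy_of_forall_before _ _ _ (fun y hy => by
        rcases List.mem_append.mp hy with hy | hy
        · exact decide_eq_true (hk y (List.mem_of_mem_filter hy))
        · exact decide_eq_true (hB y hy))]
      simp
    · have hx' : x ∈ ks := (List.mem_cons.mp hx).resolve_left hxk
      have hkx : pvKey k < pvKey x := hk x hx'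
      by_cases hkd : k ∈ d
      · rw [List.filter_cons, List.filter_cons, if_pos (by simp [hkd]),
          if_pos (by simp [hkd]), List.cons_append, List.cons_append]
        rw [show PySem.List.insertBy (fun a b => decide (pvKey a < pvKey b)) x
              (k :: (ks.filter (fun k' => decide (k' ∈ d)) ++ B))
            = k :: PySem.List.insertBy (fun a b => decide (pvKey a < pvKey b)) x
              (ks.filter (fun k' => decide (k' ∈ d)) ++ B) from by
          simp [PySem.List.insertBy, not_lt.mpr (le_of_lt hkx)]]
        rw [ih x B d hchain' hx' hxd hB]
      · rw [List.filter_cons, List.filter_cons, if_neg (by simp [hkd]),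
          if_neg (by simp [hkd, show k ≠ x from fun h => hxk h.symm])]
        exact ih x B d hchain' hx' hxd hB

-- sorted over a duplicate-free list is: known items in priority order, then unknowns in order
lemma sorted_char (d : List String) (hnd : d.Nodup) :
    PySem.List.sorted d pvKey =
      PRODUCT_LINE_ORDER.filter (fun k => decide (k ∈ d)) ++
      d.filter (fun p => decide (p ∉ PRODUCT_LINE_ORDER)) := by
  induction d using List.reverseRecOn with
  | nil => simp [PySem.List.sorted]
  | append_singleton d x ih =>
    have hnd' : d.Nodup := (List.nodup_append.mp hnd).1
    have hxd : x ∉ d := fun hmem =>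
      (List.nodup_append.mp hnd).2.2 x hmem x (List.mem_singleton_self x) rfl
    have hstep : PySem.List.sorted (d ++ [x]) pvKey =
        PySem.List.insertBy (fun a b => decide (pvKey a < pvKey b)) x
          (PySem.List.sorted d pvKey) := by
      rw [PySem.List.sorted_eq_foldl_insertBy, PySem.List.sorted_eq_foldl_insertBy,
        List.foldl_append]
      rfl
    rw [hstep, ih hnd']
    by_cases hxK : x ∈ PRODUCT_LINE_ORDER
    · rw [insert_lem PRODUCT_LINE_ORDER x _ d key_chain hxK hxd
        (fun b hb => by
          have hbK : b ∉ PRODUCT_LINE_ORDER := by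
            have := List.of_mem_filter hb; simpa using this
          rw [key_of_not_mem hbK]; exact key_lt_of_mem hxK)]
      congr 1
      · apply List.filter_congr
        intro k _
        simp [List.mem_append]
      · rw [List.filter_append]
        simp [hxK]
    · rw [PySem.List.insertBy_of_forall_not_before _ _ _ (fun y hy => by
        rw [key_of_not_mem hxK]
        simp [not_lt.mpr (key_le y)])]
      rw [List.filter_append]
      simp only [List.filter_cons, List.filter_nil]
      rw [List.append_assoc]
      congr 1
      · apply List.filter_congr
        intro k hk
        have : k ≠ x := fun he => hxK (he ▸ hk)
        simp [List.mem_append, this]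
      · simp [hxK]

-- A's second loop, generalized: seen-prefix s ++ t, with s exactly the known part
def pvDdf (t : List String) : List String → List String
  | [] => []
  | p :: ps =>
    if p ∈ PRODUCT_LINE_ORDER ∨ p ∈ t then pvDdf t ps
    else p :: pvDdf (t ++ [p]) ps

lemma loop2_char : ∀ (xs t s : List String),
    (∀ p ∈ xs, p ∈ s ↔ p ∈ PRODUCT_LINE_ORDER) →
    xs.foldl (fun acc pl => if pl ∉ acc then acc ++ [pl] else acc) (s ++ t)
      = s ++ t ++ pvDdf t xs := by
  intro xs
  induction xs with
  | nil => intro t s _; simp [pvDdf]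
  | cons p ps ih =>
    intro t s hs
    have hps : p ∈ s ↔ p ∈ PRODUCT_LINE_ORDER := hs p (by simp)
    by_cases hp : p ∈ PRODUCT_LINE_ORDER ∨ p ∈ t
    · have hmem : p ∈ s ++ t := by
        rcases hp with hp | hp
        · exact List.mem_append.mpr (Or.inl (hps.mpr hp))
        · exact List.mem_append.mpr (Or.inr hp)
      simp only [List.foldl_cons, hmem, not_true_eq_false, if_false, pvDdf, hp, if_pos]
      exact ih t s (fun q hq => hs q (by simp [hq]))
    · have hmem : p ∉ s ++ t := by
        intro h
        rcases List.mem_append.mp h with h | h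
        · exact hp (Or.inl (hps.mp h))
        · exact hp (Or.inr h)
      simp only [List.foldl_cons, hmem, not_false_eq_true, if_pos, pvDdf, hp, if_neg]
      rw [show s ++ t ++ [p] = s ++ (t ++ [p]) by simp,
        ih (t ++ [p]) s (fun q hq => hs q (by simp [hq]))]
      simp

-- dedup-then-filter computes the same unknown tail as A's second loop
lemma ddf_eq_dedup_filter : ∀ (xs u t : List String),
    (∀ p, p ∉ PRODUCT_LINE_ORDER → (p ∈ u ↔ p ∈ t)) →
    (xs.foldl (fun s x => if x ∈ s then s else s ++ [x]) u).filter
        (fun p => decide (p ∉ PRODUCT_LINE_ORDER))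
      = u.filter (fun p => decide (p ∉ PRODUCT_LINE_ORDER)) ++ pvDdf t xs := by
  intro xs
  induction xs with
  | nil => intro u t _; simp [pvDdf]
  | cons p ps ih =>
    intro u t hut
    by_cases hpK : p ∈ PRODUCT_LINE_ORDER
    · simp only [List.foldl_cons, pvDdf, hpK, true_or, if_pos]
      by_cases hpu : p ∈ u
      · rw [if_pos hpu]
        exact ih u t hut
      · rw [if_neg hpu, ih (u ++ [p]) t
          (fun q hq => by
            have : q ≠ p := fun he => hq (he ▸ hpK)
            simp [List.mem_append, this, hut q hq])]
        congr 1
        rw [List.filter_append]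
        simp [hpK]
    · have hpu : p ∈ u ↔ p ∈ t := hut p hpK
      by_cases hpt : p ∈ t
      · simp only [List.foldl_cons, pvDdf, hpK, false_or, hpt, if_pos, hpu.mpr hpt,
          if_pos]
        exact ih u t hut
      · simp only [List.foldl_cons, pvDdf, hpK, false_or, hpt, if_neg,
          show p ∉ u from fun h => hpt (hpu.mp h), not_false_eq_true, if_neg]
        rw [ih (u ++ [p]) (t ++ [p])
          (fun q hq => by simp [List.mem_append, hut q hq])]
        rw [List.filter_append]
        simp [hpK]

lemma foldl_add_eq (xs : List String) : ∀ (u : List String),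
    List.foldl PySem.Set.add u xs = xs.foldl (fun s x => if x ∈ s then s else s ++ [x]) u := by
  induction xs with
  | nil => intro u; rfl
  | cons x xs ih =>
    intro u
    simp only [List.foldl_cons]
    rw [show PySem.Set.add u x = if x ∈ u then u else u ++ [x] from by
      by_cases hx : x ∈ u <;> simp [PySem.Set.add, hx]]
    exact ih _

lemma dedup_eq_foldl (xs : List String) :
    PySem.List.dedup xs = xs.foldl (fun s x => if x ∈ s then s else s ++ [x]) [] :=
  foldl_add_eq xs []

-- ===== VERDICT (by name: the statement is the Claim_ definition above) =====
theorem get_ordered_pls_spec : Claim_equal_get_ordered_pls := by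
  intro pl_list _
  unfold Spec_get_ordered_pls get_ordered_pls get_ordered_pls_alt
  rw [PySem.List.foldl_append_ite_eq_filter, List.nil_append]
  rw [show PRODUCT_LINE_ORDER.filter (fun pl => decide (pl ∈ pl_list))
      = PRODUCT_LINE_ORDER.filter (fun pl => decide (pl ∈ pl_list)) ++ ([] : List String)
    from by simp]
  rw [loop2_char pl_list [] _
    (fun p hp => by
      constructor
      · intro h
        exact (List.mem_filter.mp h).1
      · intro h
        exact List.mem_filter.mpr ⟨h, by simpa using hp⟩)]
  rw [sorted_char (PySem.List.dedup pl_list) (PySem.List.nodup_dedup pl_list)]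
  simp only [List.append_nil]
  congr 1
  · apply List.filter_congr
    intro k _
    simp
  · rw [dedup_eq_foldl, ddf_eq_dedup_filter pl_list [] [] (fun p _ => Iff.rfl)]
    simp
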